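-- pv_equiv track=rewrite | github.com/brucefern88-blip/xyce-spice-sim-asap5-pdk | asap5/stdcells/n5_integration/via_macros/gen_xp_macros.py | gen_verilog
-- ===== SOURCE A (Python) =====
-- def gen_verilog(macros):
--     """Generate behavioral Verilog for via-grid macros."""
--     lines = [
--         '// Via-Grid Crosspoint Macros — Behavioral Verilog',
--         '// Zero transistors: pure passive metal crossbar',
--         '',
--     ]
--
--     for name, m, n, vl, hl, via, pitch in macros:
--         outs = m + n - 1
--         lines.append(f'(* keep_hierarchy *)')
--         lines.append(f'module {name} (')
--         lines.append(f'    input  wire [{m-1}:0] v,')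
--         lines.append(f'    input  wire [{n-1}:0] h,')
--         lines.append(f'    output wire [{outs-1}:0] s')
--         lines.append(f');')
--
--         for k in range(outs):
--             terms = []
--             for i in range(m):
--                 j = k - i
--                 if 0 <= j < n:
--                     terms.append(f'(v[{i}] & h[{j}])')
--             lines.append(f'    assign s[{k}] = {" | ".join(terms)};')
--
--         lines.append(f'endmodule')
--         lines.append(f'')
--
--     return '\n'.join(lines)
-- ===== SOURCE B (Python) =====
-- def gen_verilog(macros):
--     """Generate behavioral Verilog for via-grid macros (scatter into a bucket table)."""
--     out = [
--         '// Via-Grid Crosspoint Macros — Behavioral Verilog',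
--         '// Zero transistors: pure passive metal crossbar',
--         '',
--     ]
--
--     for name, m, n, vl, hl, via, pitch in macros:
--         outs = m + n - 1
--         out.append('(* keep_hierarchy *)')
--         out.append(f'module {name} (')
--         out.append(f'    input  wire [{m-1}:0] v,')
--         out.append(f'    input  wire [{n-1}:0] h,')
--         out.append(f'    output wire [{outs-1}:0] s')
--         out.append(');')
--
--         # scatter: every crosspoint (i, j) lands in bucket i + j
--         buckets = [[] for _ in range(outs)]
--         for i in range(m):
--             for j in range(n):
--                 buckets[i + j].append(f'(v[{i}] & h[{j}])')
--
--         for k in range(outs):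
--             out.append(f'    assign s[{k}] = {" | ".join(buckets[k])};')
--
--         out.append('endmodule')
--         out.append('')
--
--     return '\n'.join(out)
-- ===== Notes on version B (the rewrite author's own statement) =====
-- stated objective: alternative
-- what changed: Replaces the per-output gather (for each k, scan all i and test 0<=k-i<n) with a single scatter pass that drops every crosspoint term (i,j) into a bucket table keyed by i+j, then emits each assign line from its bucket.
import Mathlib
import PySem

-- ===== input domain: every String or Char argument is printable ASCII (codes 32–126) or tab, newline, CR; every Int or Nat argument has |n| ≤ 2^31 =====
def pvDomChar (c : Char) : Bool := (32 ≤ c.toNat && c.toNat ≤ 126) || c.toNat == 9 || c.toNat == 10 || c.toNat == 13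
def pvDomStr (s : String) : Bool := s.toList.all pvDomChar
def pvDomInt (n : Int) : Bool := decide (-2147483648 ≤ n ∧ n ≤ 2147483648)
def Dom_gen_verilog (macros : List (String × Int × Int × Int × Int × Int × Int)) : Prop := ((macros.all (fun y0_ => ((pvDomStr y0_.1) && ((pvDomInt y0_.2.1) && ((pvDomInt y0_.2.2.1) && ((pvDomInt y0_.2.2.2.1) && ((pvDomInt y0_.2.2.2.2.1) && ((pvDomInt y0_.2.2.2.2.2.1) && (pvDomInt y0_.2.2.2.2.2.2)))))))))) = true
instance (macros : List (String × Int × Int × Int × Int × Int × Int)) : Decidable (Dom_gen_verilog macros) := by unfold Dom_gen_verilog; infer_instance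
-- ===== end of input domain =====

-- B replaces A's per-output gather scan with one scatter pass into a bucket table keyed by i+j
-- (alternative decomposition; equivalence of the return value is proved for ALL inputs).

-- shared text fragments (the identical f-strings of both Pythons)
def pvTerm (i j : Int) : String :=
  "(v[" ++ PySem.Int.toStr i ++ "] & h[" ++ PySem.Int.toStr j ++ "])"

def pvAssign (k : Int) (terms : List String) : String :=
  "    assign s[" ++ PySem.Int.toStr k ++ "] = " ++ PySem.Str.join " | " terms ++ ";"

def pvInit : List String :=
  ["// Via-Grid Crosspoint Macros — Behavioral Verilog",
   "// Zero transistors: pure passive metal crossbar",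
   ""]

def pvHeader (name : String) (m n outs : Int) : List String :=
  ["(* keep_hierarchy *)",
   "module " ++ name ++ " (",
   "    input  wire [" ++ PySem.Int.toStr (m - 1) ++ ":0] v,",
   "    input  wire [" ++ PySem.Int.toStr (n - 1) ++ ":0] h,",
   "    output wire [" ++ PySem.Int.toStr (outs - 1) ++ ":0] s",
   ");"]

-- ===== PORT A =====
-- A's loop body: for each output k, gather the terms by scanning i and testing 0 <= k-i < n
def pvStepA (lines : List String) (mac : String × Int × Int × Int × Int × Int × Int) : List String :=
  match mac with
  | (name, m, n, _vl, _hl, _via, _pitch) =>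
    let outs := m + n - 1
    let lines := lines ++ pvHeader name m n outs
    let lines := (PySem.List.pyRange 0 outs 1).foldl (fun lines k =>
      let terms := (PySem.List.pyRange 0 m 1).foldl (fun terms i =>
        let j := k - i
        if 0 ≤ j ∧ j < n then terms ++ [pvTerm i j] else terms) ([] : List String)
      lines ++ [pvAssign k terms]) lines
    lines ++ ["endmodule", ""]

def gen_verilog (macros : List (String × Int × Int × Int × Int × Int × Int)) : String :=
  PySem.Str.join "\n" (macros.foldl pvStepA pvInit)

-- ===== PORT B =====
-- B's loop body: scatter every crosspoint (i, j) into bucket i+j of a bucket table, then emit bucket k.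
-- Python list indexing buckets[i+j] / buckets[k]: the index is always ≥ 0 and < outs = len(buckets)
-- when the loops run (m ≥ 1 and n ≥ 1 there), so .toNat with List.modify / List.getD is exact here.
def pvStepB (out : List String) (mac : String × Int × Int × Int × Int × Int × Int) : List String :=
  match mac with
  | (name, m, n, _vl, _hl, _via, _pitch) =>
    let outs := m + n - 1
    let out := out ++ pvHeader name m n outs
    let buckets : List (List String) :=
      (PySem.List.pyRange 0 outs 1).map (fun _ => ([] : List String))
    let buckets :=
      (PySem.List.pyRange 0 m 1).foldl (fun buckets i =>
        (PySem.List.pyRange 0 n 1).foldl (fun buckets j =>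
          buckets.modify (i + j).toNat (· ++ [pvTerm i j])) buckets) buckets
    let out := (PySem.List.pyRange 0 outs 1).foldl (fun out k =>
      out ++ [pvAssign k (buckets.getD k.toNat [])]) out
    out ++ ["endmodule", ""]

def gen_verilog_alt (macros : List (String × Int × Int × Int × Int × Int × Int)) : String :=
  PySem.Str.join "\n" (macros.foldl pvStepB pvInit)

-- ===== PRECONDITION & SPEC =====
def Spec_gen_verilog (macros : List (String × Int × Int × Int × Int × Int × Int)) (out : String) : Prop := out = gen_verilog_alt macros
instance (macros : List (String × Int × Int × Int × Int × Int × Int)) (out : String) : Decidable (Spec_gen_verilog macros out) := by unfold Spec_gen_verilog; infer_instance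

-- ===== CLAIM (what is proved, stated in full; the proofs are below) =====
def Claim_equal_gen_verilog : Prop := ∀ (macros : List (String × Int × Int × Int × Int × Int × Int)), Dom_gen_verilog macros → Spec_gen_verilog macros (gen_verilog macros)

-- ===== LEMMAS AND PROOFS =====

-- A's gather loop produces exactly the valid crosspoints of row k, in increasing i
theorem pv_gather (n k : Int) (l : List Int) (acc : List String) :
    l.foldl (fun terms i =>
        if 0 ≤ k - i ∧ k - i < n then terms ++ [pvTerm i (k - i)] else terms) acc
    = acc ++ (l.filter (fun i => decide (0 ≤ k - i ∧ k - i < n))).map (fun i => pvTerm i (k - i)) := by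
  induction l generalizing acc with
  | nil => simp
  | cons a l ih =>
    simp only [List.foldl_cons, List.filter_cons]
    rw [ih]
    by_cases h1 : a ≤ k <;> by_cases h2 : k - a < n <;> simp [h1, h2]

-- the j-range hit by bucket k at row i: exactly j = k - i when it is in range
theorem pv_filter_range (n i k : Int) :
    (PySem.List.pyRange 0 n 1).filter (fun j => i + j == k)
    = if 0 ≤ k - i ∧ k - i < n then [k - i] else [] := by
  have h1 : (PySem.List.pyRange 0 n 1).filter (fun j => i + j == k)
      = (PySem.List.pyRange 0 n 1).filter (fun j => j == k - i) := by
    apply List.filter_congr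
    intro j _
    by_cases h : i + j = k
    · simp [show j = k - i by omega]
    · simp [h, show ¬(j = k - i) by omega]
  rw [h1, List.filter_beq]
  by_cases h : 0 ≤ k - i ∧ k - i < n
  · have hm : k - i ∈ PySem.List.pyRange 0 n 1 := by
      rw [PySem.List.mem_pyRange_one]; omega
    rw [List.count_eq_one_of_mem (PySem.List.nodup_pyRange_one 0 n) hm, if_pos h]
    simp
  · have hm : k - i ∉ PySem.List.pyRange 0 n 1 := by
      rw [PySem.List.mem_pyRange_one]; omega
    rw [List.count_eq_zero_of_not_mem hm, if_neg h]
    simp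

-- List.modify through getD: only the touched in-range bucket changes
theorem pv_getD_modify (bs : List (List String)) (t k : Nat) (f : List String → List String) :
    (bs.modify t f).getD k [] = if t = k ∧ k < bs.length then f (bs.getD k []) else bs.getD k [] := by
  simp only [List.getD_eq_getElem?_getD, List.getElem?_modify]
  by_cases ht : t = k
  · subst ht
    by_cases hl : t < bs.length
    · rw [List.getElem?_eq_getElem hl]
      simp [hl]
    · rw [List.getElem?_eq_none (by omega)]
      simp [hl]
  · simp [ht]

-- a fold of modifies never changes the number of buckets
theorem pv_length_foldl_modify (l : List Int) (g : Int → Nat) (f : Int → List String → List String)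
    (bs : List (List String)) :
    (l.foldl (fun bs j => (bs.modify (g j) (f j) : List (List String))) bs).length = bs.length := by
  induction l generalizing bs with
  | nil => rfl
  | cons a l ih => rw [List.foldl_cons, ih, List.length_modify]

-- the freshly built bucket table is all-empty
theorem pv_getD_init (outs : Int) (k : Nat) :
    ((PySem.List.pyRange 0 outs 1).map (fun _ => ([] : List String))).getD k [] = [] := by
  rw [List.getD_eq_getElem?_getD, List.getElem?_map]
  cases (PySem.List.pyRange 0 outs 1)[k]? <;> rfl

-- one row of the scatter adds to bucket k exactly the terms whose key i+j is k
theorem pv_inner_list (i k : Int) (hi : 0 ≤ i) (hk : 0 ≤ k) :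
    ∀ (l : List Int), (∀ j ∈ l, 0 ≤ j) → ∀ (bs : List (List String)), k.toNat < bs.length →
      (l.foldl (fun bs j => bs.modify (i + j).toNat (· ++ [pvTerm i j])) bs).getD k.toNat []
      = bs.getD k.toNat [] ++ (l.filter (fun j => i + j == k)).map (fun j => pvTerm i j) := by
  intro l
  induction l with
  | nil => intro _ bs _; simp
  | cons a l ih =>
    intro hl bs hlen
    simp only [List.foldl_cons, List.filter_cons]
    have ha : 0 ≤ a := hl a (by simp)
    have hstep : (bs.modify (i + a).toNat (· ++ [pvTerm i a])).getD k.toNat []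
        = if i + a = k then bs.getD k.toNat [] ++ [pvTerm i a] else bs.getD k.toNat [] := by
      rw [pv_getD_modify]
      by_cases h : i + a = k
      · rw [if_pos ⟨by omega, hlen⟩, if_pos h]
      · rw [if_neg (fun hc => h (by omega)), if_neg h]
    rw [ih (fun j hj => hl j (by simp [hj])) _ (by rw [List.length_modify]; exact hlen), hstep]
    by_cases h : i + a = k
    · simp [h]
    · simp [h]

-- the whole scatter: bucket k holds exactly A's gathered terms, in the same order
theorem pv_scatter_list (n k : Int) (hk : 0 ≤ k) :
    ∀ (l : List Int), (∀ i ∈ l, 0 ≤ i) → ∀ (bs : List (List String)), k.toNat < bs.length →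
      (l.foldl (fun bs i =>
          (PySem.List.pyRange 0 n 1).foldl (fun bs j =>
            bs.modify (i + j).toNat (· ++ [pvTerm i j])) bs) bs).getD k.toNat []
      = bs.getD k.toNat [] ++ (l.filter (fun i => decide (0 ≤ k - i ∧ k - i < n))).map (fun i => pvTerm i (k - i)) := by
  intro l
  induction l with
  | nil => intro _ bs _; simp
  | cons a l ih =>
    intro hl bs hlen
    simp only [List.foldl_cons, List.filter_cons]
    have ha : 0 ≤ a := hl a (by simp)
    have hlen2 : k.toNat < ((PySem.List.pyRange 0 n 1).foldl (fun bs j =>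
        bs.modify (a + j).toNat (· ++ [pvTerm a j])) bs).length := by
      rw [pv_length_foldl_modify (PySem.List.pyRange 0 n 1) (fun j => (a + j).toNat)
        (fun j => (· ++ [pvTerm a j])) bs]
      exact hlen
    rw [ih (fun i0 hi0 => hl i0 (by simp [hi0])) _ hlen2]
    rw [pv_inner_list a k ha hk (PySem.List.pyRange 0 n 1)
      (fun j hj => by rw [PySem.List.mem_pyRange_one] at hj; omega) bs hlen]
    rw [pv_filter_range n a k]
    by_cases h : 0 ≤ k - a ∧ k - a < n
    · rw [if_pos h]
      simp [h, show a ≤ k by omega]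
    · rw [if_neg h]
      by_cases h1 : a ≤ k <;> by_cases h2 : k - a < n <;> simp [h1, h2] <;> try omega

theorem pv_step_eq : pvStepA = pvStepB := by
  funext lines mac
  obtain ⟨name, m, n, vl, hl, via, pitch⟩ := mac
  simp only [pvStepA, pvStepB]
  congr 1
  rw [PySem.List.foldl_append_singleton_eq_map, PySem.List.foldl_append_singleton_eq_map]
  refine congrArg (fun z => lines ++ pvHeader name m n (m + n - 1) ++ z) ?_
  apply List.map_congr_left
  intro k hkmem
  rw [PySem.List.mem_pyRange_one] at hkmem
  rw [pv_gather]
  rw [pv_scatter_list n k hkmem.1 (PySem.List.pyRange 0 m 1)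
    (fun i hi => by rw [PySem.List.mem_pyRange_one] at hi; omega) _
    (by rw [List.length_map, PySem.List.length_pyRange_one]; omega)]
  rw [pv_getD_init]

-- ===== VERDICT (by name: the statement is the Claim_ definition above) =====
theorem gen_verilog_spec : Claim_equal_gen_verilog := by
  intro macros _
  unfold Spec_gen_verilog gen_verilog gen_verilog_alt
  rw [pv_step_eq]
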